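-- pv_equiv track=rewrite | github.com/Sugansdv/python | Project_1207/typing_speed_test.py | count_errors
-- ===== SOURCE A (Python) =====
-- def count_errors(original, typed):
--     original_words = original.split()
--     typed_words = typed.split()
--     errors = 0
--     for o, t in zip(original_words, typed_words):
--         if o != t:
--             errors += 1
--     errors += abs(len(original_words) - len(typed_words))
--     return errors
-- ===== SOURCE B (Python) =====
-- def _next_word(s, i):
--     n = len(s)
--     while i < n and s[i].isspace():
--         i += 1
--     start = i
--     while i < n and not s[i].isspace():
--         i += 1
--     return s[start:i], i
--
-- def count_errors(original, typed):
--     i = j = 0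
--     errors = 0
--     while True:
--         o, i = _next_word(original, i)
--         t, j = _next_word(typed, j)
--         if not o and not t:
--             return errors
--         if o != t:
--             errors += 1
-- ===== Notes on version B (the rewrite author's own statement) =====
-- stated objective: alternative
-- what changed: B never builds the word lists: a streaming two-pointer tokenizer extracts the next word from each raw string in lockstep and counts mismatches (an exhausted side yields the empty word, which never equals a real word), replacing A's split()+zip+abs(length difference) with O(1) extra memory.
import Mathlib
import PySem

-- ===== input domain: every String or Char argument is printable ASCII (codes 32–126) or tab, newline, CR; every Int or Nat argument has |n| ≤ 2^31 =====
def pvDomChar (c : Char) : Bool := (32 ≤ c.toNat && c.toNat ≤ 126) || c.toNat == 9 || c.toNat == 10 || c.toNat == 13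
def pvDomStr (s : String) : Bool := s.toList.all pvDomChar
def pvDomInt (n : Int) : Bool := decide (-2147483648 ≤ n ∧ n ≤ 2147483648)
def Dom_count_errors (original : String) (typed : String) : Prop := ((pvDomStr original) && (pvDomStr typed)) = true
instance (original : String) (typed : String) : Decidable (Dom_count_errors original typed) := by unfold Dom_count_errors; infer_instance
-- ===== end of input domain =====

-- B replaces A's split()+zip+abs(length difference) by a streaming two-pointer tokenizer over the
-- raw strings that never builds the word lists (an exhausted side yields the empty word); same values, O(1) extra space.


-- ===== PORT A =====
def count_errors (original : String) (typed : String) : Int :=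
  let original_words := PySem.Str.split₀ original
  let typed_words := PySem.Str.split₀ typed
  let errors : Int :=
    (List.zip original_words typed_words).foldl
      (fun errors ot => if ot.1 ≠ ot.2 then errors + 1 else errors) 0
  errors + |(original_words.length : Int) - (typed_words.length : Int)|

-- ===== PORT B =====
-- Source B's `while i < n and s[i].isspace(): i += 1` — the index loop transcribed as recursion on the unread suffix
def pvSkipWs : List Char → List Char
  | [] => []
  | c :: r => if PySem.Chars.isspace c then pvSkipWs r else c :: r

-- Source B's `while i < n and not s[i].isspace(): i += 1` plus the slice s[start:i]: returns (word, unread suffix)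
def pvTakeWord : List Char → List Char × List Char
  | [] => ([], [])
  | c :: r =>
    if PySem.Chars.isspace c then ([], c :: r)
    else
      let p := pvTakeWord r
      (c :: p.1, p.2)

theorem pvSkipWs_length_le (s : List Char) : (pvSkipWs s).length ≤ s.length := by
  induction s with
  | nil => simp [pvSkipWs]
  | cons c r ih =>
    simp only [pvSkipWs]
    split_ifs
    · simpa using Nat.le_succ_of_le ih
    · simp

theorem pvTakeWord_snd_length_le (s : List Char) : (pvTakeWord s).2.length ≤ s.length := by
  induction s with
  | nil => simp [pvTakeWord]
  | cons c r ih =>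
    simp only [pvTakeWord]
    split_ifs
    · simp
    · simpa using Nat.le_succ_of_le ih

theorem pvNext_length_lt (s : List Char) (h : (pvTakeWord (pvSkipWs s)).1 ≠ []) :
    (pvTakeWord (pvSkipWs s)).2.length < s.length := by
  have h1 : (pvTakeWord (pvSkipWs s)).2.length < (pvSkipWs s).length := by
    cases hs : pvSkipWs s with
    | nil => simp only [hs] at h; simp [pvTakeWord] at h
    | cons c r =>
      simp only [hs] at h ⊢
      simp only [pvTakeWord] at h ⊢
      split_ifs with hc
      · simp [hc] at h
      · simpa using Nat.lt_succ_of_le (pvTakeWord_snd_length_le r)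
  exact Nat.lt_of_lt_of_le h1 (pvSkipWs_length_le s)

-- Source B's main `while True` loop with its running `errors` accumulator
def pvLoop (s t : List Char) (errors : Int) : Int :=
  let po := pvTakeWord (pvSkipWs s)
  let pt := pvTakeWord (pvSkipWs t)
  if po.1 = [] ∧ pt.1 = [] then errors
  else pvLoop po.2 pt.2 (if po.1 ≠ pt.1 then errors + 1 else errors)
termination_by s.length + t.length
decreasing_by
  rename_i hne
  rcases Decidable.em ((pvTakeWord (pvSkipWs s)).1 = []) with ho | ho
  · have ht : (pvTakeWord (pvSkipWs t)).1 ≠ [] := fun h => hne ⟨ho, h⟩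
    have h2 := pvNext_length_lt t ht
    have h3 := Nat.le_trans (pvTakeWord_snd_length_le _) (pvSkipWs_length_le s)
    omega
  · have h2 := pvNext_length_lt s ho
    have h3 := Nat.le_trans (pvTakeWord_snd_length_le _) (pvSkipWs_length_le t)
    omega

def count_errors_alt (original : String) (typed : String) : Int :=
  pvLoop original.toList typed.toList 0

-- ===== PRECONDITION & SPEC =====
def Spec_count_errors (original : String) (typed : String) (out : Int) : Prop := out = count_errors_alt original typed
instance (original : String) (typed : String) (out : Int) : Decidable (Spec_count_errors original typed out) := by unfold Spec_count_errors; infer_instance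

-- ===== CLAIM (what is proved, stated in full; the proofs are below) =====
def Claim_equal_count_errors : Prop := ∀ (original : String) (typed : String), Dom_count_errors original typed → Spec_count_errors original typed (count_errors original typed)

-- ===== LEMMAS AND PROOFS =====

-- mathematical yardstick: cumulative mismatch count over sentinel-padded word lists
def pvZLC {α : Type} [DecidableEq α] : List α → List α → Int
  | [], [] => 0
  | [], _ :: ts => 1 + pvZLC [] ts
  | _ :: os, [] => 1 + pvZLC os []
  | o :: os, t :: ts => (if o ≠ t then 1 else 0) + pvZLC os ts

-- the word list B's tokenizer produces
def pvWords (s : List Char) : List (List Char) :=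
  let p := pvTakeWord (pvSkipWs s)
  if h : p.1 = [] then [] else p.1 :: pvWords p.2
termination_by s.length
decreasing_by exact pvNext_length_lt s h

-- split₀.go without its accumulator
def pvWrest : List Char → List Char → List (List Char)
  | [], cur => if cur.isEmpty then [] else [cur.reverse]
  | c :: r, cur =>
    if PySem.Chars.isspace c then
      if cur.isEmpty then pvWrest r [] else cur.reverse :: pvWrest r []
    else pvWrest r (c :: cur)

theorem pvGo_eq_wrest (s : List Char) : ∀ cur acc,
    PySem.Chars.split₀.go s cur acc = acc.reverse ++ pvWrest s cur := by
  induction s with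
  | nil =>
    intro cur acc
    simp only [PySem.Chars.split₀.go, pvWrest]
    split_ifs <;> simp
  | cons c r ih =>
    intro cur acc
    simp only [PySem.Chars.split₀.go, pvWrest]
    split_ifs with h1 h2
    · rw [ih]
    · rw [ih]; simp
    · rw [ih]

theorem pvSkipWs_cases (s : List Char) :
    pvSkipWs s = [] ∨ ∃ c r, pvSkipWs s = c :: r ∧ PySem.Chars.isspace c = false := by
  induction s with
  | nil => left; rfl
  | cons c r ih =>
    simp only [pvSkipWs]
    split_ifs with h
    · exact ih
    · right; exact ⟨c, r, rfl, by simp [h]⟩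

theorem pvTakeWord_nil_of_empty (s : List Char) (h : (pvTakeWord (pvSkipWs s)).1 = []) :
    pvSkipWs s = [] ∧ (pvTakeWord (pvSkipWs s)).2 = [] := by
  rcases pvSkipWs_cases s with hs | ⟨c, r, hs, hc⟩
  · rw [hs]; simp [pvTakeWord]
  · rw [hs] at h; simp [pvTakeWord, hc] at h

theorem pvWords_nil : pvWords [] = [] := by
  rw [pvWords]; simp [pvSkipWs, pvTakeWord]

theorem pvWords_cons_space (c : Char) (r : List Char) (hc : PySem.Chars.isspace c = true) :
    pvWords (c :: r) = pvWords r := by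
  conv_lhs => rw [pvWords]
  conv_rhs => rw [pvWords]
  simp only [pvSkipWs, hc, if_true]

theorem pvWrest_eq_words (n : Nat) : ∀ s : List Char, s.length ≤ n →
    (pvWrest s [] = pvWords s ∧
     ∀ cur, cur ≠ [] →
       pvWrest s cur = (cur.reverse ++ (pvTakeWord s).1) :: pvWords (pvTakeWord s).2) := by
  induction n with
  | zero =>
    intro s hs
    have : s = [] := List.eq_nil_of_length_eq_zero (Nat.le_zero.mp hs)
    subst this
    constructor
    · rw [pvWords_nil]; simp [pvWrest]
    · intro cur hcur
      simp only [pvWrest, pvTakeWord, pvWords_nil]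
      simp [List.isEmpty_iff, hcur]
  | succ n ih =>
    intro s hs
    cases s with
    | nil => exact ih [] (by simp)
    | cons c r =>
      have hr : r.length ≤ n := by simpa using hs
      constructor
      · simp only [pvWrest, List.isEmpty_nil, if_true]
        split_ifs with hc
        · rw [(ih r hr).1, pvWords_cons_space c r hc]
        · rw [(ih r hr).2 [c] (by simp)]
          have hsk : pvSkipWs (c :: r) = c :: r := by simp [pvSkipWs, hc]
          have hW : pvWords (c :: r) = (pvTakeWord (c :: r)).1 :: pvWords (pvTakeWord (c :: r)).2 := by
            rw [pvWords, hsk]; simp [pvTakeWord, hc]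
          rw [hW]
          simp [pvTakeWord, hc]
      · intro cur hcur
        simp only [pvWrest, pvTakeWord]
        by_cases hc : PySem.Chars.isspace c = true
        · simp only [hc, if_true, List.isEmpty_iff, hcur, if_false]
          rw [(ih r hr).1, pvWords_cons_space c r hc]
          simp
        · simp only [if_neg hc]
          rw [(ih r hr).2 (c :: cur) (by simp)]
          simp

theorem pvSplit₀_eq_words (s : List Char) : PySem.Chars.split₀ s = pvWords s := by
  have hgo := pvGo_eq_wrest s [] []
  have h2 := (pvWrest_eq_words s.length s le_rfl).1
  simpa [PySem.Chars.split₀, h2] using hgo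

theorem pvFoldl_shift {α : Type} [DecidableEq α] (l : List (α × α)) (c : Int) :
    l.foldl (fun errors ot => if ot.1 ≠ ot.2 then errors + 1 else errors) c
      = c + l.foldl (fun errors ot => if ot.1 ≠ ot.2 then errors + 1 else errors) 0 := by
  induction l generalizing c with
  | nil => simp
  | cons p l ih =>
    simp only [List.foldl_cons]
    rw [ih, ih (if p.1 ≠ p.2 then 0 + 1 else 0)]
    split_ifs <;> ring

theorem pvCount_eq {α : Type} [DecidableEq α] (os ts : List α) :
    (List.zip os ts).foldl (fun errors ot => if ot.1 ≠ ot.2 then errors + 1 else errors) 0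
      + |(os.length : Int) - (ts.length : Int)| = pvZLC os ts := by
  induction os generalizing ts with
  | nil =>
    induction ts with
    | nil => simp [pvZLC]
    | cons t ts ih =>
      simp only [pvZLC, List.zip_nil_left, List.foldl_nil] at *
      simp only [List.length_cons, List.length_nil, Int.abs_eq_natAbs] at *
      omega
  | cons o os ih =>
    cases ts with
    | nil =>
      have h : pvZLC (o :: os) ([] : List α) = 1 + pvZLC os [] := by
        simp [pvZLC]
      have := ih []
      simp only [List.zip_nil_right, List.foldl_nil] at this ⊢
      simp only [List.length_cons, List.length_nil, Int.abs_eq_natAbs] at *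
      omega
    | cons t ts =>
      simp only [List.zip_cons_cons, List.foldl_cons, pvZLC]
      rw [pvFoldl_shift]
      have := ih ts
      simp only [List.length_cons, Int.abs_eq_natAbs] at *
      split_ifs <;> omega

theorem pvLoop_eq_zlc (n : Nat) : ∀ s t : List Char, s.length + t.length ≤ n → ∀ e : Int,
    pvLoop s t e = e + pvZLC (pvWords s) (pvWords t) := by
  induction n with
  | zero =>
    intro s t hst e
    have hs : s = [] := List.eq_nil_of_length_eq_zero (by omega)
    have ht : t = [] := List.eq_nil_of_length_eq_zero (by omega)
    subst hs; subst ht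
    rw [pvLoop]
    simp [pvSkipWs, pvTakeWord, pvWords_nil, pvZLC]
  | succ n ih =>
    intro s t hst e
    rw [pvLoop]
    by_cases hboth : (pvTakeWord (pvSkipWs s)).1 = [] ∧ (pvTakeWord (pvSkipWs t)).1 = []
    · rw [if_pos hboth]
      have h1 : pvWords s = [] := by rw [pvWords]; simp [hboth.1]
      have h2 : pvWords t = [] := by rw [pvWords]; simp [hboth.2]
      rw [h1, h2]
      simp [pvZLC]
    · rw [if_neg hboth]
      rcases Decidable.em ((pvTakeWord (pvSkipWs s)).1 = []) with ho | ho
      · have ht : (pvTakeWord (pvSkipWs t)).1 ≠ [] := fun h => hboth ⟨ho, h⟩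
        obtain ⟨hse, hre⟩ := pvTakeWord_nil_of_empty s ho
        have hlt := pvNext_length_lt t ht
        have hle2 := Nat.le_trans (pvTakeWord_snd_length_le _) (pvSkipWs_length_le s)
        rw [ih _ _ (by omega) _]
        have hWs : pvWords s = [] := by rw [pvWords]; simp [ho]
        have hWt : pvWords t = (pvTakeWord (pvSkipWs t)).1 :: pvWords (pvTakeWord (pvSkipWs t)).2 := by
          rw [pvWords]; simp [ht]
        rw [hWs, hWt, hre, pvWords_nil]
        have hz : pvZLC ([] : List (List Char))
            ((pvTakeWord (pvSkipWs t)).1 :: pvWords (pvTakeWord (pvSkipWs t)).2)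
            = 1 + pvZLC [] (pvWords (pvTakeWord (pvSkipWs t)).2) := by simp [pvZLC]
        rw [hz]
        have hne : (pvTakeWord (pvSkipWs s)).1 ≠ (pvTakeWord (pvSkipWs t)).1 := by
          rw [ho]; exact fun h => ht h.symm
        rw [if_pos hne]
        ring
      · have hlt := pvNext_length_lt s ho
        have hle2 := Nat.le_trans (pvTakeWord_snd_length_le _) (pvSkipWs_length_le t)
        rcases Decidable.em ((pvTakeWord (pvSkipWs t)).1 = []) with ht | ht
        · obtain ⟨hte, hre⟩ := pvTakeWord_nil_of_empty t ht
          rw [ih _ _ (by omega) _]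
          have hWt : pvWords t = [] := by rw [pvWords]; simp [ht]
          have hWs : pvWords s = (pvTakeWord (pvSkipWs s)).1 :: pvWords (pvTakeWord (pvSkipWs s)).2 := by
            rw [pvWords]; simp [ho]
          rw [hWs, hWt, hre, pvWords_nil]
          have hz : pvZLC ((pvTakeWord (pvSkipWs s)).1 :: pvWords (pvTakeWord (pvSkipWs s)).2)
              ([] : List (List Char))
              = 1 + pvZLC (pvWords (pvTakeWord (pvSkipWs s)).2) [] := by simp [pvZLC]
          rw [hz]
          have hne : (pvTakeWord (pvSkipWs s)).1 ≠ (pvTakeWord (pvSkipWs t)).1 := by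
            rw [ht]; exact ho
          rw [if_pos hne]
          ring
        · have hlt2 := pvNext_length_lt t ht
          rw [ih _ _ (by omega) _]
          have hWs : pvWords s = (pvTakeWord (pvSkipWs s)).1 :: pvWords (pvTakeWord (pvSkipWs s)).2 := by
            rw [pvWords]; simp [ho]
          have hWt : pvWords t = (pvTakeWord (pvSkipWs t)).1 :: pvWords (pvTakeWord (pvSkipWs t)).2 := by
            rw [pvWords]; simp [ht]
          rw [hWs, hWt]
          simp only [pvZLC]
          split_ifs <;> ring

theorem pvZipfold_map (os ts : List (List Char)) :
    (List.zip (os.map String.ofList) (ts.map String.ofList)).foldl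
        (fun errors ot => if ot.1 ≠ ot.2 then errors + 1 else errors) (0 : Int)
      = (List.zip os ts).foldl (fun errors ot => if ot.1 ≠ ot.2 then errors + 1 else errors) 0 := by
  rw [List.zip_map, List.foldl_map]
  congr 1
  funext e p
  simp [String.ofList_inj]

-- ===== VERDICT (by name: the statement is the Claim_ definition above) =====
theorem count_errors_spec : Claim_equal_count_errors := by
  intro original typed _
  unfold Spec_count_errors count_errors count_errors_alt
  simp only [PySem.Str.split₀]
  rw [pvZipfold_map, List.length_map, List.length_map]
  rw [pvCount_eq, pvSplit₀_eq_words, pvSplit₀_eq_words]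
  rw [pvLoop_eq_zlc (original.toList.length + typed.toList.length) _ _ le_rfl 0]
  ring
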